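-- pv_equiv track=rewrite | github.com/Chopemon/Willowcreek | services/scene_image_generator.py | _extract_mood
-- ===== SOURCE A (Python) =====
-- def _extract_mood(text: str, scene_type: str) -> str:
--     """Determine the mood/atmosphere of the scene"""
--     text_lower = text.lower()
--
--     # Keyword-based mood detection
--     if any(word in text_lower for word in ["passion", "desire", "lust", "aroused"]):
--         return "passionate"
--     elif any(word in text_lower for word in ["tense", "tension", "anxious", "nervous"]):
--         return "tense"
--     elif any(word in text_lower for word in ["playful", "teasing", "giggle"]):
--         return "playful"
--     elif any(word in text_lower for word in ["dark", "shadow", "forbidden", "secret"]):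
--         return "dark"
--     elif any(word in text_lower for word in ["angry", "argument", "fight"]):
--         return "confrontational"
--     elif any(word in text_lower for word in ["gentle", "soft", "tender"]):
--         return "intimate"
--
--     # Default by scene type
--     mood_defaults = {
--         "sexual": "passionate",
--         "quirk": "tense",
--         "drama": "confrontational",
--         "crime": "dark",
--         "tension": "tense"
--     }
--     return mood_defaults.get(scene_type, "atmospheric")
-- ===== SOURCE B (Python) =====
-- # B: one flat keyword->mood map is scanned once to collect ALL matching moods;
-- # the result is the matched mood of highest priority (lowest rank), else the
-- # scene-type default. No early-exit branch chain: collect-then-select-minimum.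
-- _KEYWORD_MOOD = {
--     "passion": "passionate", "desire": "passionate", "lust": "passionate", "aroused": "passionate",
--     "tense": "tense", "tension": "tense", "anxious": "tense", "nervous": "tense",
--     "playful": "playful", "teasing": "playful", "giggle": "playful",
--     "dark": "dark", "shadow": "dark", "forbidden": "dark", "secret": "dark",
--     "angry": "confrontational", "argument": "confrontational", "fight": "confrontational",
--     "gentle": "intimate", "soft": "intimate", "tender": "intimate",
-- }
--
-- _PRIORITY = {"passionate": 0, "tense": 1, "playful": 2, "dark": 3, "confrontational": 4, "intimate": 5}
--
-- _DEFAULTS = {"sexual": "passionate", "quirk": "tense", "drama": "confrontational",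
--              "crime": "dark", "tension": "tense"}
--
--
-- def _extract_mood(text: str, scene_type: str) -> str:
--     text_lower = text.lower()
--     hits = [mood for word, mood in _KEYWORD_MOOD.items() if word in text_lower]
--     if hits:
--         return min(hits, key=lambda m: _PRIORITY.get(m, 0))
--     return _DEFAULTS.get(scene_type, "atmospheric")
-- ===== Notes on version B (the rewrite author's own statement) =====
-- stated objective: alternative
-- what changed: Instead of an early-exit if/elif chain over keyword groups, B scans one flat keyword-to-mood map collecting ALL matching moods and returns the minimum under a priority ranking (min with key, first-minimum tie-break), falling back to the same scene-type defaults; equal because each mood's rank equals its branch position and every keyword of a group maps to the same mood.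
import Mathlib
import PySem

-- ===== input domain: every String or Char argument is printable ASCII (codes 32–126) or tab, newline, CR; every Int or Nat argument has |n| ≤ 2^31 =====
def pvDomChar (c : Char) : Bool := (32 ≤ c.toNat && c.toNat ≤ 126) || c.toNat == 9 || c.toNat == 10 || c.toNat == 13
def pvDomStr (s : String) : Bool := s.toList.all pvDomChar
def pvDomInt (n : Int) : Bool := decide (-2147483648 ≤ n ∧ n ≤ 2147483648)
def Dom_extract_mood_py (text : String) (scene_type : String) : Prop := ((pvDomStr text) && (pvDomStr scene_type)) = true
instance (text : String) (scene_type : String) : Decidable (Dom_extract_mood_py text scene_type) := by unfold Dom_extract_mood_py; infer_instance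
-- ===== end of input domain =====

-- B replaces A's early-exit if/elif chain by a collect-then-select pass: one flat
-- keyword->mood map is filtered for matches and the minimum-priority matched mood is
-- returned (same scene-type default fallback); an alternative decomposition, same cost.


-- ===== PORT A =====
def extract_mood_py (text : String) (scene_type : String) : String :=
  let text_lower := PySem.Str.lower text
  if ["passion", "desire", "lust", "aroused"].any (fun word => PySem.Str.isIn word text_lower) then
    "passionate"
  else if ["tense", "tension", "anxious", "nervous"].any (fun word => PySem.Str.isIn word text_lower) then
    "tense"
  else if ["playful", "teasing", "giggle"].any (fun word => PySem.Str.isIn word text_lower) then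
    "playful"
  else if ["dark", "shadow", "forbidden", "secret"].any (fun word => PySem.Str.isIn word text_lower) then
    "dark"
  else if ["angry", "argument", "fight"].any (fun word => PySem.Str.isIn word text_lower) then
    "confrontational"
  else if ["gentle", "soft", "tender"].any (fun word => PySem.Str.isIn word text_lower) then
    "intimate"
  else
    let mood_defaults : PySem.Dict String String :=
      PySem.Dict.ofList [("sexual", "passionate"), ("quirk", "tense"),
        ("drama", "confrontational"), ("crime", "dark"), ("tension", "tense")]
    mood_defaults.getD scene_type "atmospheric"

-- ===== PORT B =====
-- the module-level _KEYWORD_MOOD dict (insertion order)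
def pvKeywordMood : List (String × String) :=
  [("passion", "passionate"), ("desire", "passionate"), ("lust", "passionate"), ("aroused", "passionate"),
   ("tense", "tense"), ("tension", "tense"), ("anxious", "tense"), ("nervous", "tense"),
   ("playful", "playful"), ("teasing", "playful"), ("giggle", "playful"),
   ("dark", "dark"), ("shadow", "dark"), ("forbidden", "dark"), ("secret", "dark"),
   ("angry", "confrontational"), ("argument", "confrontational"), ("fight", "confrontational"),
   ("gentle", "intimate"), ("soft", "intimate"), ("tender", "intimate")]

def pvPriority : PySem.Dict String Int :=
  PySem.Dict.ofList [("passionate", 0), ("tense", 1), ("playful", 2), ("dark", 3),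
    ("confrontational", 4), ("intimate", 5)]

def pvDefaults : PySem.Dict String String :=
  PySem.Dict.ofList [("sexual", "passionate"), ("quirk", "tense"),
    ("drama", "confrontational"), ("crime", "dark"), ("tension", "tense")]

def extract_mood_py_alt (text : String) (scene_type : String) : String :=
  let text_lower := PySem.Str.lower text
  let hits := (pvKeywordMood.filter (fun p => PySem.Str.isIn p.1 text_lower)).map Prod.snd
  match PySem.List.min? hits (fun m => pvPriority.getD m 0) with
  | some m => m
  | none => pvDefaults.getD scene_type "atmospheric"

-- ===== PRECONDITION & SPEC =====
def Spec_extract_mood_py (text : String) (scene_type : String) (out : String) : Prop := out = extract_mood_py_alt text scene_type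
instance (text : String) (scene_type : String) (out : String) : Decidable (Spec_extract_mood_py text scene_type out) := by unfold Spec_extract_mood_py; infer_instance

-- ===== CLAIM =====
def Claim_equal_extract_mood_py : Prop := ∀ (text : String) (scene_type : String), Dom_extract_mood_py text scene_type → Spec_extract_mood_py text scene_type (extract_mood_py text scene_type)

-- ===== LEMMAS AND PROOFS =====

-- min with a key returns the head when the head's key is minimal (first-minimum tie-break)
theorem pv_min?_cons {α : Type} (key : α → Int) (x : α) (t : List α)
    (h : ∀ y ∈ t, key x ≤ key y) :
    PySem.List.min? (x :: t) key = some x := by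
  have aux : ∀ (t : List α), (∀ y ∈ t, key x ≤ key y) →
      t.foldl
        (fun acc y =>
          match acc with
          | none => some y
          | some m => if key y < key m then some y else some m)
        (some x) = some x := by
    intro t
    induction t with
    | nil => intro _; rfl
    | cons y t ih =>
      intro h
      simp only [List.foldl_cons]
      rw [if_neg (not_lt.mpr (h y (List.mem_cons_self)))]
      exact ih (fun z hz => h z (List.mem_cons_of_mem _ hz))
  simpa only [PySem.List.min?, List.foldl_cons] using aux t h

-- a group with no matching keyword contributes nothing to hits
theorem pv_filter_nil (g : List (String × String)) (P : String → Bool)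
    (h : g.any (fun p => P p.1) = false) :
    g.filter (fun p => P p.1) = [] := by
  rw [List.filter_eq_nil_iff]
  intro p hp
  simp only [List.any_eq_false] at h
  simpa using h p hp

-- if some keyword of group g matches, every pair of g carries mood m, and m's rank
-- is at most the rank of every mood occurring after g, then the min over hits is m
theorem pv_case_min (g rest : List (String × String)) (P : String → Bool)
    (key : String → Int) (m : String)
    (hg : ∀ p ∈ g, p.2 = m)
    (hany : g.any (fun p => P p.1) = true)
    (hle : ∀ y ∈ rest.map Prod.snd, key m ≤ key y) :
    PySem.List.min? (((g ++ rest).filter (fun p => P p.1)).map Prod.snd) key = some m := by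
  rw [List.filter_append, List.map_append]
  obtain ⟨p0, hp0, hP0⟩ := List.any_eq_true.mp hany
  have hne : (g.filter (fun p => P p.1)).map Prod.snd ≠ [] := by
    simp only [ne_eq, List.map_eq_nil_iff, List.filter_eq_nil_iff, not_forall]
    exact ⟨p0, hp0, by simpa using hP0⟩
  cases hgf : (g.filter (fun p => P p.1)).map Prod.snd with
  | nil => exact absurd hgf hne
  | cons z t0 =>
    have hz : z = m := by
      have hzmem : z ∈ (g.filter (fun p => P p.1)).map Prod.snd := by
        rw [hgf]; exact List.mem_cons_self
      obtain ⟨q, hq, hqz⟩ := List.mem_map.mp hzmem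
      rw [← hqz]; exact hg q (List.mem_of_mem_filter hq)
    subst hz
    rw [List.cons_append]
    apply pv_min?_cons
    intro y hy
    rcases List.mem_append.mp hy with h1 | h2
    · have hymem : y ∈ (g.filter (fun p => P p.1)).map Prod.snd := by
        rw [hgf]; exact List.mem_cons_of_mem _ h1
      obtain ⟨q, hq, hqy⟩ := List.mem_map.mp hymem
      rw [← hqy, hg q (List.mem_of_mem_filter hq)]
    · obtain ⟨q, hq, hqy⟩ := List.mem_map.mp h2
      exact hle y (List.mem_map.mpr ⟨q, List.mem_of_mem_filter hq, hqy⟩)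

-- group decompositions of the flat map (definitional)
def pvG1 : List (String × String) :=
  [("passion", "passionate"), ("desire", "passionate"), ("lust", "passionate"), ("aroused", "passionate")]
def pvG2 : List (String × String) :=
  [("tense", "tense"), ("tension", "tense"), ("anxious", "tense"), ("nervous", "tense")]
def pvG3 : List (String × String) :=
  [("playful", "playful"), ("teasing", "playful"), ("giggle", "playful")]
def pvG4 : List (String × String) :=
  [("dark", "dark"), ("shadow", "dark"), ("forbidden", "dark"), ("secret", "dark")]
def pvG5 : List (String × String) :=
  [("angry", "confrontational"), ("argument", "confrontational"), ("fight", "confrontational")]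
def pvG6 : List (String × String) :=
  [("gentle", "intimate"), ("soft", "intimate"), ("tender", "intimate")]

-- ===== VERDICT =====
theorem extract_mood_py_spec : Claim_equal_extract_mood_py := by
  intro text scene_type _
  unfold Spec_extract_mood_py
  simp only [extract_mood_py, extract_mood_py_alt]
  generalize PySem.Str.lower text = tl
  have hKM : pvKeywordMood = pvG1 ++ (pvG2 ++ (pvG3 ++ (pvG4 ++ (pvG5 ++ pvG6)))) := rfl
  rw [hKM]
  by_cases hc1 : (["passion", "desire", "lust", "aroused"] : List String).any (fun word => PySem.Str.isIn word tl) = true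
  · rw [if_pos hc1,
      pv_case_min pvG1 (pvG2 ++ (pvG3 ++ (pvG4 ++ (pvG5 ++ pvG6)))) (fun w => PySem.Str.isIn w tl)
        _ "passionate" (by decide) (by simpa [pvG1, List.any_cons] using hc1) (by decide)]
  · rw [if_neg hc1, List.filter_append,
      pv_filter_nil pvG1 (fun w => PySem.Str.isIn w tl)
        (by simpa [pvG1, List.any_cons] using eq_false_of_ne_true hc1),
      List.nil_append]
    by_cases hc2 : (["tense", "tension", "anxious", "nervous"] : List String).any (fun word => PySem.Str.isIn word tl) = true
    · rw [if_pos hc2,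
        pv_case_min pvG2 (pvG3 ++ (pvG4 ++ (pvG5 ++ pvG6))) (fun w => PySem.Str.isIn w tl)
          _ "tense" (by decide) (by simpa [pvG2, List.any_cons] using hc2) (by decide)]
    · rw [if_neg hc2, List.filter_append,
        pv_filter_nil pvG2 (fun w => PySem.Str.isIn w tl)
          (by simpa [pvG2, List.any_cons] using eq_false_of_ne_true hc2),
        List.nil_append]
      by_cases hc3 : (["playful", "teasing", "giggle"] : List String).any (fun word => PySem.Str.isIn word tl) = true
      · rw [if_pos hc3,
          pv_case_min pvG3 (pvG4 ++ (pvG5 ++ pvG6)) (fun w => PySem.Str.isIn w tl)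
            _ "playful" (by decide) (by simpa [pvG3, List.any_cons] using hc3) (by decide)]
      · rw [if_neg hc3, List.filter_append,
          pv_filter_nil pvG3 (fun w => PySem.Str.isIn w tl)
            (by simpa [pvG3, List.any_cons] using eq_false_of_ne_true hc3),
          List.nil_append]
        by_cases hc4 : (["dark", "shadow", "forbidden", "secret"] : List String).any (fun word => PySem.Str.isIn word tl) = true
        · rw [if_pos hc4,
            pv_case_min pvG4 (pvG5 ++ pvG6) (fun w => PySem.Str.isIn w tl)
              _ "dark" (by decide) (by simpa [pvG4, List.any_cons] using hc4) (by decide)]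
        · rw [if_neg hc4, List.filter_append,
            pv_filter_nil pvG4 (fun w => PySem.Str.isIn w tl)
              (by simpa [pvG4, List.any_cons] using eq_false_of_ne_true hc4),
            List.nil_append]
          by_cases hc5 : (["angry", "argument", "fight"] : List String).any (fun word => PySem.Str.isIn word tl) = true
          · rw [if_pos hc5,
              pv_case_min pvG5 pvG6 (fun w => PySem.Str.isIn w tl)
                _ "confrontational" (by decide) (by simpa [pvG5, List.any_cons] using hc5) (by decide)]
          · rw [if_neg hc5, List.filter_append,
              pv_filter_nil pvG5 (fun w => PySem.Str.isIn w tl)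
                (by simpa [pvG5, List.any_cons] using eq_false_of_ne_true hc5),
              List.nil_append]
            by_cases hc6 : (["gentle", "soft", "tender"] : List String).any (fun word => PySem.Str.isIn word tl) = true
            · rw [if_pos hc6]
              have h6 := pv_case_min pvG6 [] (fun w => PySem.Str.isIn w tl)
                (fun m => pvPriority.getD m 0) "intimate" (by decide)
                (by simpa [pvG6, List.any_cons] using hc6) (by intro y hy; simp at hy)
              simp only [List.append_nil] at h6
              rw [h6]
            · rw [if_neg hc6,
                pv_filter_nil pvG6 (fun w => PySem.Str.isIn w tl)
                  (by simpa [pvG6, List.any_cons] using eq_false_of_ne_true hc6)]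
              rfl
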